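-- pv_equiv track=rewrite | github.com/Byrboniti/TEST27.10 | 1st block.py | ekr
-- ===== SOURCE A (Python) =====
-- def ekr(len_ekr,phone):
--     list_phone = (phone.split())
--     new = ''
--     for i in list_phone:
--         new = new+ i
--     lst = list(new)[::-1]
--     for i in lst:
--         if lst.index(i) < len_ekr:
--             lst[lst.index(i)] = 'X'
--     lst.insert(3,' ')
--     lst.insert(7,' ')
--     lst.insert(11,' ')
--     lst = lst[::-1]
--     fin=''
--     for i in lst:
--         fin = fin +i
--     return fin
-- ===== SOURCE B (Python) =====
-- def ekr(len_ekr, phone):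
--     s = ''.join(phone.split())
--     n = len(s)
--     k = max(0, min(len_ekr, n))
--     fm = s[:n - k] + 'X' * k
--     c9, c6, c3 = max(0, n - 9), max(0, n - 6), max(0, n - 3)
--     return ' '.join([fm[:c9], fm[c9:c6], fm[c6:c3], fm[c3:]])
-- ===== Notes on version B (the rewrite author's own statement) =====
-- stated objective: faster
-- what changed: B works entirely in the forward orientation: instead of reversing the string, masking via repeated list.index scans inside the loop, inserting spaces and reversing back, it masks the last min(len_ekr, n) characters with one slice plus 'X'*k and formats by joining four slices cut at max(0, n-9/6/3).
import Mathlib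
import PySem

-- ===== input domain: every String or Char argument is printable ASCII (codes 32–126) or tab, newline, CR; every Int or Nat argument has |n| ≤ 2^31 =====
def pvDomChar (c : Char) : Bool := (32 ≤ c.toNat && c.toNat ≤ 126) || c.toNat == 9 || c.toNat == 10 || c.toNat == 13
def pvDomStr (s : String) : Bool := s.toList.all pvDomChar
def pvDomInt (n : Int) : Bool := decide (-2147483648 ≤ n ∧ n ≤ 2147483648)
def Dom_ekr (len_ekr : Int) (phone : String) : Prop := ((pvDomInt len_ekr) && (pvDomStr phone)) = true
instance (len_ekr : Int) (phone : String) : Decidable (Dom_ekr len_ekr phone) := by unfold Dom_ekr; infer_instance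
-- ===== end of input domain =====

-- B masks the last k = min(len_ekr, n) characters working entirely in the forward orientation:
-- no double reversal, no repeated list.index scans, grouping done with slices computed from the right.


-- ===== PORT A =====
-- one step of Python's 'for i in lst: if lst.index(i) < len_ekr: lst[lst.index(i)] = "X"';
-- the list's length never changes, so the mutating for-loop reads positions 0..len-1 of the current list
def ekrMaskStep (len_ekr : Int) (l : List Char) (p : Nat) : List Char :=
  let i := l.getD p ' '
  match PySem.List.index? l i with
  | some idx => if (idx : Int) < len_ekr then l.set idx 'X' else l
  | none => l

def ekr (len_ekr : Int) (phone : String) : String :=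
  let list_phone := PySem.Chars.split₀ phone.toList
  let new := list_phone.foldl (fun acc i => acc ++ i) ([] : List Char)
  let lst := (PySem.List.slice? new none none (-1)).getD []   -- list(new)[::-1]
  let lst := (List.range lst.length).foldl (ekrMaskStep len_ekr) lst
  let lst := PySem.List.insert lst 3 ' '
  let lst := PySem.List.insert lst 7 ' '
  let lst := PySem.List.insert lst 11 ' '
  let lst := (PySem.List.slice? lst none none (-1)).getD []   -- lst[::-1]
  let fin := lst.foldl (fun acc c => acc ++ [c]) ([] : List Char)
  String.ofList fin

-- ===== PORT B =====
def ekr_alt (len_ekr : Int) (phone : String) : String :=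
  let s := PySem.Chars.join [] (PySem.Chars.split₀ phone.toList)   -- ''.join(phone.split())
  let n : Int := s.length
  let k := max 0 (min len_ekr n)
  let fm := PySem.List.slice s none (some (n - k)) ++ PySem.List.pyRepeat ['X'] k
  let c9 := max 0 (n - 9)
  let c6 := max 0 (n - 6)
  let c3 := max 0 (n - 3)
  String.ofList (PySem.Chars.join [' ']
    [PySem.List.slice fm none (some c9),
     PySem.List.slice fm (some c9) (some c6),
     PySem.List.slice fm (some c6) (some c3),
     PySem.List.slice fm (some c3) none])

-- ===== PRECONDITION & SPEC =====
def Spec_ekr (len_ekr : Int) (phone : String) (out : String) : Prop := out = ekr_alt len_ekr phone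
instance (len_ekr : Int) (phone : String) (out : String) : Decidable (Spec_ekr len_ekr phone out) := by unfold Spec_ekr; infer_instance

-- ===== CLAIM (what is proved, stated in full; the proofs are below) =====
def Claim_equal_ekr : Prop := ∀ (len_ekr : Int) (phone : String), Dom_ekr len_ekr phone → Spec_ekr len_ekr phone (ekr len_ekr phone)

-- ===== LEMMAS AND PROOFS =====

-- building a string char by char is the identity
theorem pv_foldl_concat (l acc : List Char) :
    l.foldl (fun a c => a ++ [c]) acc = acc ++ l := by
  induction l generalizing acc with
  | nil => simp
  | cons x xs ih => simp [List.foldl_cons, ih]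

theorem pv_foldl_append (parts : List (List Char)) (acc : List Char) :
    parts.foldl (fun a i => a ++ i) acc = acc ++ parts.flatten := by
  induction parts generalizing acc with
  | nil => simp
  | cons x xs ih => simp [List.foldl_cons, ih]

theorem pv_join_nil (parts : List (List Char)) :
    PySem.Chars.join [] parts = parts.flatten := by
  simp [PySem.Chars.join, List.intercalate]
  induction parts with
  | nil => simp
  | cons x xs ih =>
    cases xs with
    | nil => simp [List.intersperse]
    | cons y ys => simpa [List.intersperse] using ih

-- Python's clamping insert, stated uniformly via take/drop
theorem pv_insert_eq (xs : List Char) (j : Nat) (v : Char) :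
    PySem.List.insert xs (j : Int) v = xs.take j ++ v :: xs.drop j := by
  simp only [PySem.List.insert, PySem.List.sliceIndices]
  norm_num
  rw [if_neg (show ¬ (j:Int) < 0 by omega)]
  by_cases h : j ≤ xs.length
  · have h2 : min (j:Int) (xs.length:Int) = (j:Int) := by omega
    simp [h2]
  · have h2 : min (j:Int) (xs.length:Int) = (xs.length:Int) := by omega
    rw [h2]
    simp [List.take_of_length_le (by omega : xs.length ≤ j),
          List.drop_of_length_le (by omega : xs.length ≤ j)]

-- reverse of a (clamping) insert, read in the forward orientation; Nat subtraction does the clamping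
theorem pv_reverse_insert (xs : List Char) (j : Nat) (v : Char) :
    (PySem.List.insert xs (j : Int) v).reverse
      = xs.reverse.take (xs.length - j) ++ v :: xs.reverse.drop (xs.length - j) := by
  rw [pv_insert_eq]
  simp [List.reverse_append, List.reverse_take, List.reverse_drop]

theorem pv_insert_length (xs : List Char) (j : Nat) (v : Char) :
    (PySem.List.insert xs (j : Int) v).length = xs.length + 1 := by
  rw [pv_insert_eq]
  simp

-- first occurrence of a non-'X' value behind a masked prefix
theorem pv_index_replicate (j : Nat) (t : List Char) (i : Char) (hi : i ≠ 'X') :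
    PySem.List.index? (List.replicate j 'X' ++ i :: t) i = some j := by
  induction j with
  | zero => simpa using PySem.List.index?_cons_self i t
  | succ j ih =>
    rw [List.replicate_succ, List.cons_append,
        PySem.List.index?_cons_of_ne _ (by simpa using (Ne.symm hi)), ih]
    rfl

-- one loop step: position p becomes masked iff p < min(len, len_ekr)
theorem pv_mask_step (len_ekr : Int) (lst : List Char) (p : Nat) (hp : p < lst.length) :
    ekrMaskStep len_ekr
        (List.replicate (min p (min lst.length len_ekr.toNat)) 'X'
          ++ lst.drop (min p (min lst.length len_ekr.toNat))) p
      = List.replicate (min (p+1) (min lst.length len_ekr.toNat)) 'X'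
          ++ lst.drop (min (p+1) (min lst.length len_ekr.toNat)) := by
  have hget : ∀ j : Nat, j ≤ p →
      (List.replicate j 'X' ++ lst.drop j).getD p ' ' = lst[p] := by
    intro j hj
    rw [List.getD_eq_getElem?_getD, List.getElem?_append_right (by simpa using hj),
        List.length_replicate, List.getElem?_drop]
    have : j + (p - j) = p := by omega
    rw [this, List.getElem?_eq_getElem hp]
    rfl
  by_cases hpm : p < min lst.length len_ekr.toNat
  · -- masking position p
    have hj : min p (min lst.length len_ekr.toNat) = p := by omega
    have hj1 : min (p+1) (min lst.length len_ekr.toNat) = p + 1 := by omega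
    rw [hj, hj1]
    have hdp : lst.drop p = lst[p] :: lst.drop (p+1) := List.drop_eq_getElem_cons hp
    have hle : (0:Int) < len_ekr := by omega
    have hmerge : ∀ t : List Char, List.replicate p 'X' ++ 'X' :: t
        = List.replicate (p+1) 'X' ++ t := by
      intro t
      rw [List.replicate_succ', List.append_assoc, List.singleton_append]
    by_cases hx : lst[p] = 'X'
    · have hform : List.replicate p 'X' ++ lst.drop p
          = 'X' :: (List.replicate p 'X' ++ lst.drop (p+1)) := by
        rw [hdp, hx, hmerge, List.replicate_succ, List.cons_append]
      simp only [ekrMaskStep]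
      rw [hget p le_rfl, hx, hform, PySem.List.index?_cons_self]
      dsimp only
      rw [if_pos (by exact_mod_cast hle)]
      rw [List.set_cons_zero, List.replicate_succ, List.cons_append]
    · have hidx : PySem.List.index? (List.replicate p 'X' ++ lst.drop p) lst[p] = some p := by
        rw [hdp]; exact pv_index_replicate p _ _ hx
      simp only [ekrMaskStep]
      rw [hget p le_rfl, hidx]
      dsimp only
      rw [if_pos (by omega : ((p:Nat) : Int) < len_ekr)]
      rw [hdp, List.set_append_right _ _ (by simp), List.length_replicate]
      simp only [Nat.sub_self, List.set_cons_zero]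
      rw [hmerge]
  · -- p is past the masked prefix: nothing changes
    set m := min lst.length len_ekr.toNat with hm
    have hj : min p m = m := by omega
    have hj1 : min (p+1) m = m := by omega
    rw [hj, hj1]
    simp only [ekrMaskStep]
    cases hidx : PySem.List.index? (List.replicate m 'X' ++ lst.drop m)
        ((List.replicate m 'X' ++ lst.drop m).getD p ' ') with
    | none => rfl
    | some q =>
      dsimp only
      by_cases hc : (q:Int) < len_ekr
      · rw [if_pos hc]
        have hq : q < m := by omega
        rw [List.set_append, if_pos (by simpa using hq), List.set_replicate_self]
      · rw [if_neg hc]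

theorem pv_mask_aux (len_ekr : Int) (lst : List Char) (c p : Nat) (h : p + c = lst.length) :
    (List.range' p c).foldl (ekrMaskStep len_ekr)
        (List.replicate (min p (min lst.length len_ekr.toNat)) 'X'
          ++ lst.drop (min p (min lst.length len_ekr.toNat)))
      = List.replicate (min lst.length len_ekr.toNat) 'X'
          ++ lst.drop (min lst.length len_ekr.toNat) := by
  induction c generalizing p with
  | zero =>
    have : min p (min lst.length len_ekr.toNat) = min lst.length len_ekr.toNat := by omega
    simp [this]
  | succ c ih =>
    rw [List.range'_succ, List.foldl_cons, pv_mask_step len_ekr lst p (by omega)]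
    exact ih (p+1) (by omega)

-- the whole masking loop masks exactly the first min(len, len_ekr) positions
theorem pv_mask (len_ekr : Int) (lst : List Char) :
    (List.range lst.length).foldl (ekrMaskStep len_ekr) lst
      = List.replicate (min lst.length len_ekr.toNat) 'X'
          ++ lst.drop (min lst.length len_ekr.toNat) := by
  have h := pv_mask_aux len_ekr lst lst.length 0 (by omega)
  simpa [List.range_eq_range'] using h

-- splicing ' ' at forward cuts n-3, n-6, n-9 (in that order) equals the four-slice decomposition
theorem pv_format (fm : List Char) (n : Nat) (h : fm.length = n) :
    ((fm.take (n-3) ++ ' ' :: fm.drop (n-3)).take (n-6)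
        ++ ' ' :: (fm.take (n-3) ++ ' ' :: fm.drop (n-3)).drop (n-6)).take (n-9)
      ++ ' ' :: ((fm.take (n-3) ++ ' ' :: fm.drop (n-3)).take (n-6)
        ++ ' ' :: (fm.take (n-3) ++ ' ' :: fm.drop (n-3)).drop (n-6)).drop (n-9)
      = fm.take (n-9)
        ++ ' ' :: ((fm.drop (n-9)).take ((n-6)-(n-9))
        ++ ' ' :: ((fm.drop (n-6)).take ((n-3)-(n-6))
        ++ ' ' :: fm.drop (n-3))) := by
  have h3 : (n-6) ≤ (fm.take (n-3)).length := by simp [h]; omega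
  have h9 : (n-9) ≤ (fm.take (n-6)).length := by simp [h]; omega
  rw [List.take_append_of_le_length h3, List.drop_append_of_le_length h3,
      List.take_take, Nat.min_eq_left (by omega), List.drop_take,
      List.take_append_of_le_length h9, List.drop_append_of_le_length h9,
      List.take_take, Nat.min_eq_left (by omega), List.drop_take]

-- ===== VERDICT (by name: the statement is the Claim_ definition above) =====
theorem ekr_spec : Claim_equal_ekr := by
  intro len_ekr phone _
  show ekr len_ekr phone = ekr_alt len_ekr phone
  unfold ekr ekr_alt
  simp only [pv_foldl_append, pv_foldl_concat, pv_join_nil, List.nil_append,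
    PySem.List.slice?_none_none_neg_one, Option.getD_some]
  set s := (PySem.Chars.split₀ phone.toList).flatten with hs
  set n := s.length with hn
  set m := min n len_ekr.toNat with hm
  -- the masked (still reversed) list
  have hmask : List.foldl (ekrMaskStep len_ekr) s.reverse (List.range n)
      = List.replicate m 'X' ++ s.reverse.drop m := by
    have h := pv_mask len_ekr s.reverse
    rw [show s.reverse.length = n from by simp [hn]] at h
    exact h
  rw [show s.reverse.length = n from by simp [hn], hmask]
  set L := List.replicate m 'X' ++ s.reverse.drop m with hL
  have hmn : m ≤ n := by omega
  have hLlen : L.length = n := by simp [hL]; omega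
  -- forward-orientation view of the masked list
  have hfm : L.reverse = s.take (n - m) ++ List.replicate m 'X' := by
    rw [hL, List.reverse_append, List.reverse_replicate, List.reverse_drop,
        List.reverse_reverse, show s.reverse.length = n by simp [hn]]
  -- the three inserts, reversed
  rw [show (3:Int) = ((3:Nat):Int) by norm_num,
      show (7:Int) = ((7:Nat):Int) by norm_num,
      show (11:Int) = ((11:Nat):Int) by norm_num,
      pv_reverse_insert, pv_insert_length, pv_insert_length,
      pv_reverse_insert, pv_insert_length,
      pv_reverse_insert, hLlen,
      show n + 1 + 1 - 11 = n - 9 by omega, show n + 1 - 7 = n - 6 by omega]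
  rw [pv_format L.reverse n (by simp [hLlen])]
  -- B's slices
  have hk : max 0 (min len_ekr (n:Int)) = ((m:Nat):Int) := by omega
  have hnk : (n:Int) - ((m:Nat):Int) = (((n - m : Nat)):Int) := by omega
  rw [hk, hnk, PySem.List.slice_to s (by omega), PySem.List.pyRepeat_singleton]
  simp only [Int.toNat_natCast]
  rw [← hfm]
  have hfml : L.reverse.length = n := by simp [hLlen]
  have e9 : max 0 ((n:Int) - 9) = (((n - 9 : Nat)):Int) := by omega
  have e6 : max 0 ((n:Int) - 6) = (((n - 6 : Nat)):Int) := by omega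
  have e3 : max 0 ((n:Int) - ((3:Nat):Int)) = (((n - 3 : Nat)):Int) := by omega
  rw [e9, e6, e3,
      PySem.List.slice_to L.reverse (by omega),
      PySem.List.slice_of_nonneg L.reverse (by omega) (by omega) (by rw [hfml]; omega) (by rw [hfml]; omega),
      PySem.List.slice_of_nonneg L.reverse (by omega) (by omega) (by rw [hfml]; omega) (by rw [hfml]; omega),
      PySem.List.slice_from L.reverse (by omega)]
  simp only [Int.toNat_natCast]
  simp [PySem.Chars.join, List.intercalate, List.intersperse]
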